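-- pv_equiv track=rewrite | github.com/llvm/llvm-project | clang/test/Analysis/LifetimeSafety/benchmark.py | generate_cpp_nested_loop_test
-- ===== SOURCE A (Python) =====
-- def generate_cpp_nested_loop_test(n: int) -> str:
--     """
--     Generates C++ code with N levels of nested loops.
--     This pattern tests how analysis performance scales with loop nesting depth,
--     which is a key factor in the complexity of dataflow analyses on structured
--     control flow.
--
--     Example (n=3):
--         struct MyObj { int id; ~MyObj() {} };
--         void nested_loops_3() {
--             MyObj* p = nullptr;
--             for(int i0=0; i0<2; ++i0) {
--                 MyObj s0;
--                 p = &s0;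
--                 for(int i1=0; i1<2; ++i1) {
--                     MyObj s1;
--                     p = &s1;
--                     for(int i2=0; i2<2; ++i2) {
--                         MyObj s2;
--                         p = &s2;
--                     }
--                 }
--             }
--         }
--     """
--     if n <= 0:
--         return "// Nesting depth must be positive."
--
--     cpp_code = "struct MyObj { int id; ~MyObj() {} };\n\n"
--     cpp_code += f"void nested_loops_{n}() {{\n"
--     cpp_code += "    MyObj* p = nullptr;\n"
--
--     for i in range(n):
--         indent = "    " * (i + 1)
--         cpp_code += f"{indent}for(int i{i}=0; i{i}<2; ++i{i}) {{\n"
--         cpp_code += f"{indent}    MyObj s{i}; p = &s{i};\n"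
--
--     for i in range(n - 1, -1, -1):
--         indent = "    " * (i + 1)
--         cpp_code += f"{indent}}}\n"
--
--     cpp_code += "}\n"
--     cpp_code += f"\nint main() {{ nested_loops_{n}(); return 0; }}\n"
--     return cpp_code
-- ===== SOURCE B (Python) =====
-- def generate_cpp_nested_loop_test(n: int) -> str:
--     if n <= 0:
--         return "// Nesting depth must be positive."
--
--     # Divide and conquer: pair(lo, hi) returns (open lines, close lines) for
--     # levels lo..hi-1 as lists; halves are merged by concatenating the open
--     # lists in order and the close lists in reverse order. Depth is O(log n).
--     def pair(lo, hi):
--         if hi - lo <= 1: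
--             indent = "    " * (lo + 1)
--             return (
--                 [f"{indent}for(int i{lo}=0; i{lo}<2; ++i{lo}) {{\n"
--                  f"{indent}    MyObj s{lo}; p = &s{lo};\n"],
--                 [f"{indent}}}\n"],
--             )
--         mid = (lo + hi) // 2
--         o_left, c_left = pair(lo, mid)
--         o_right, c_right = pair(mid, hi)
--         return (o_left + o_right, c_right + c_left)
--
--     opens, closes = pair(0, n)
--     return (
--         "struct MyObj { int id; ~MyObj() {} };\n\n"
--         + f"void nested_loops_{n}() {{\n"
--         + "    MyObj* p = nullptr;\n"
--         + "".join(opens) + "".join(closes)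
--         + "}\n"
--         + f"\nint main() {{ nested_loops_{n}(); return 0; }}\n"
--     )
-- ===== Notes on version B (the rewrite author's own statement) =====
-- stated objective: alternative
-- what changed: Replaces A's two sequential linear passes (forward loop appending open lines, then a backward range loop appending closing braces) with a divide-and-conquer helper pair(lo,hi) that returns the (open part, close part) for levels lo..hi-1 and merges halves by concatenating open parts in order and close parts in reverse
import Mathlib
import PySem

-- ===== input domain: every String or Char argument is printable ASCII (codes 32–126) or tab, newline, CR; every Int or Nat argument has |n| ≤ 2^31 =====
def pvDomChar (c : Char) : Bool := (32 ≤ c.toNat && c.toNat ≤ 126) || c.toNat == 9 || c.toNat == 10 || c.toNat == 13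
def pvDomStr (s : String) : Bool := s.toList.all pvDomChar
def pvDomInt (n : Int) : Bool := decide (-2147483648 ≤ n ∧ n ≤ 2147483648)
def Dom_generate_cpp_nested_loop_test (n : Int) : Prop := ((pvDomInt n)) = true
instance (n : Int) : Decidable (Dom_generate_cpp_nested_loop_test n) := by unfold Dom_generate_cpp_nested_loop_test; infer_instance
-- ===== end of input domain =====

-- B replaces A's forward-open / backward-close loop pair with a divide-and-conquer
-- pair(lo,hi) = (open part, close part), halves merged with the close parts reversed.

-- ===== PORT A =====
-- "    " * (i + 1): Python string repetition of four spaces, i.e. 4*(i+1) spaces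
-- (a non-positive count yields the empty string, as in Python); exact on all Int i.
def pvIndent (i : Int) : String := String.ofList (List.replicate (4 * (i + 1)).toNat ' ')
-- the two f-string lines emitted for level i, and the closing line (text shared by both Pythons)
def pvOpenLines (i : Int) : String :=
  pvIndent i ++ "for(int i" ++ PySem.Int.toStr i ++ "=0; i" ++ PySem.Int.toStr i ++ "<2; ++i" ++ PySem.Int.toStr i ++ ") {\n"
  ++ pvIndent i ++ "    MyObj s" ++ PySem.Int.toStr i ++ "; p = &s" ++ PySem.Int.toStr i ++ ";\n"
def pvCloseLine (i : Int) : String := pvIndent i ++ "}\n"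

def generate_cpp_nested_loop_test (n : Int) : String :=
  if n ≤ 0 then "// Nesting depth must be positive."
  else
    let code0 := "struct MyObj { int id; ~MyObj() {} };\n\n"
    let code1 := code0 ++ "void nested_loops_" ++ PySem.Int.toStr n ++ "() {\n"
    let code2 := code1 ++ "    MyObj* p = nullptr;\n"
    let code3 := (PySem.List.pyRange 0 n 1).foldl (fun acc i => acc ++ pvOpenLines i) code2
    let code4 := (PySem.List.pyRange (n - 1) (-1) (-1)).foldl (fun acc i => acc ++ pvCloseLine i) code3
    code4 ++ "}\n" ++ "\nint main() { nested_loops_" ++ PySem.Int.toStr n ++ "(); return 0; }\n"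

-- ===== PORT B =====
-- pair(lo,hi): lists of open/close lines for levels lo..hi-1, merged divide-and-conquer
-- (the '≤ 1' base guard only makes the recursion total; Source B writes the same guard)
def pvPair (lo hi : Int) : List String × List String :=
  if hi - lo ≤ 1 then ([pvOpenLines lo], [pvCloseLine lo])
  else
    let mid := PySem.Int.floordiv (lo + hi) 2
    let L := pvPair lo mid
    let R := pvPair mid hi
    (L.1 ++ R.1, R.2 ++ L.2)
termination_by (hi - lo).toNat
decreasing_by
  all_goals
    rw [PySem.Int.floordiv_eq_ediv_of_pos (by omega)]
    omega

def generate_cpp_nested_loop_test_alt (n : Int) : String :=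
  if n ≤ 0 then "// Nesting depth must be positive."
  else
    let oc := pvPair 0 n
    "struct MyObj { int id; ~MyObj() {} };\n\n"
    ++ "void nested_loops_" ++ PySem.Int.toStr n ++ "() {\n"
    ++ "    MyObj* p = nullptr;\n"
    ++ String.join oc.1 ++ String.join oc.2
    ++ "}\n"
    ++ "\nint main() { nested_loops_" ++ PySem.Int.toStr n ++ "(); return 0; }\n"

-- ===== PRECONDITION & SPEC =====
def Spec_generate_cpp_nested_loop_test (n : Int) (out : String) : Prop := out = generate_cpp_nested_loop_test_alt n
instance (n : Int) (out : String) : Decidable (Spec_generate_cpp_nested_loop_test n out) := by unfold Spec_generate_cpp_nested_loop_test; infer_instance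

-- ===== CLAIM =====
def Claim_equal_generate_cpp_nested_loop_test : Prop := ∀ (n : Int), Dom_generate_cpp_nested_loop_test n → Spec_generate_cpp_nested_loop_test n (generate_cpp_nested_loop_test n)

-- ===== LEMMAS AND PROOFS =====

-- concatenation of g over a list (proof-side helper)
def pvJoin (g : Int → String) : List Int → String
  | [] => ""
  | x :: xs => g x ++ pvJoin g xs

-- 'acc += g(i)' over a list is acc followed by the concatenation of g
theorem pvFoldl_app (g : Int → String) (l : List Int) (acc : String) :
    l.foldl (fun a x => a ++ g x) acc = acc ++ pvJoin g l := by
  induction l generalizing acc with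
  | nil => simp [pvJoin]
  | cons x xs ih => simp [pvJoin, ih, String.append_assoc]

-- String.join's foldl peels off like list append
theorem pvFoldl_join (l : List String) (acc : String) :
    l.foldl (fun r s => r ++ s) acc = acc ++ String.join l := by
  induction l generalizing acc with
  | nil => simp [String.join, List.foldl_nil]
  | cons x xs ih =>
    have hx : String.join (x :: xs) = x ++ String.join xs := by
      rw [String.join, List.foldl_cons, ih]
      simp [String.join]
    rw [List.foldl_cons, ih, hx, String.append_assoc]

-- ''.join of the g-images of a list is the concatenation of g over it
theorem pvJoin_map (g : Int → String) (l : List Int) :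
    String.join (l.map g) = pvJoin g l := by
  induction l with
  | nil => simp [pvJoin, String.join, List.foldl_nil]
  | cons x xs ih =>
    rw [List.map_cons, pvJoin, ← ih, String.join, List.foldl_cons, pvFoldl_join]
    simp

-- pair(lo,hi) is exactly (open lines for lo..hi-1, close lines for lo..hi-1 reversed)
theorem pvPair_eq (lo hi : Int) (h : lo < hi) :
    pvPair lo hi =
      ((PySem.List.pyRange lo hi 1).map pvOpenLines,
       (PySem.List.pyRange lo hi 1).reverse.map pvCloseLine) := by
  rw [pvPair]
  by_cases hb : hi - lo ≤ 1
  · have hone : hi = lo + 1 := by omega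
    simp [hone, PySem.List.pyRange_one_singleton]
  · have hmid1 : lo < PySem.Int.floordiv (lo + hi) 2 := by
      rw [PySem.Int.floordiv_eq_ediv_of_pos (by omega)]; omega
    have hmid2 : PySem.Int.floordiv (lo + hi) 2 < hi := by
      rw [PySem.Int.floordiv_eq_ediv_of_pos (by omega)]; omega
    simp only [hb, if_false]
    rw [pvPair_eq lo _ hmid1, pvPair_eq _ hi hmid2]
    rw [PySem.List.pyRange_one_append lo (PySem.Int.floordiv (lo + hi) 2) hi
          (by omega) (by omega)]
    simp
termination_by (hi - lo).toNat
decreasing_by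
  all_goals
    rw [PySem.Int.floordiv_eq_ediv_of_pos (by omega)]
    omega

-- ===== VERDICT =====
theorem generate_cpp_nested_loop_test_spec : Claim_equal_generate_cpp_nested_loop_test := by
  intro n _
  unfold Spec_generate_cpp_nested_loop_test generate_cpp_nested_loop_test generate_cpp_nested_loop_test_alt
  by_cases h : n ≤ 0
  · simp [h]
  · simp only [h, if_false]
    rw [pvPair_eq 0 n (by omega)]
    simp only [pvFoldl_app, PySem.List.pyRange_neg_one_eq_reverse, pvJoin_map]
    have h0 : (-1 : Int) + 1 = 0 := by norm_num
    rw [h0, show n - 1 + 1 = n by ring]
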